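-- pv_equiv track=rewrite | github.com/100591608/G87.2026.T03.GE2b | src/main/python/uc3m_consulting/enterprise_manager.py | validate_cif
-- ===== SOURCE A (Python) =====
-- def validate_cif(cif: str):
--     """RETURNS TRUE IF THE IBAN RECEIVED IS VALID SPANISH IBAN,
--     OR FALSE IN OTHER CASE"""
--
--     cif = str(cif).strip().upper()
--     if len(cif) != 9:
--         return False
--
--     letter = cif[0]
--     number_block = cif[1:8]
--     control_char = cif[8]
--
--     if not letter.isalpha() or not number_block.isdigit() or not control_char.isalnum():
--         return False
--
--     even_sum = sum(int(number_block[i]) for i in (1, 3, 5))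
--
--     odd_sum = 0
--     for i in (0, 2, 4, 6):
--         v = int(number_block[i]) * 2
--         odd_sum += (v // 10) + (v % 10)
--
--     total = even_sum + odd_sum
--     base_digit = (10 - (total % 10)) % 10
--
--     control_digit = str(base_digit)
--     control_letter = "JABCDEFGHI"[base_digit]
--
--     if letter in "ABEH":
--         return control_char == control_digit
--     if letter in "KPQS":
--         return control_char == control_letter
--     return control_char in (control_digit, control_letter)
-- ===== SOURCE B (Python) =====
-- def validate_cif(cif: str):
--     """RETURNS TRUE IF THE CIF RECEIVED IS A VALID SPANISH CIF,
--     OR FALSE IN OTHER CASE"""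
--
--     cif = str(cif).strip().upper()
--     if len(cif) != 9:
--         return False
--
--     letter = cif[0]
--     number_block = cif[1:8]
--     control_char = cif[8]
--
--     if not letter.isalpha() or not number_block.isdigit() or not control_char.isalnum():
--         return False
--
--     # Luhn-style checksum, walking the block right-to-left with a doubling toggle
--     # (the rightmost block digit is a doubled position).
--     total = 0
--     double = True
--     for d in reversed(number_block):
--         v = int(d)
--         if double:
--             v = 2 * v - 9 if v > 4 else 2 * v
--         total += v
--         double = not double
--
--     # Instead of constructing the expected control character, read a candidate
--     # value off the control character and check the Luhn congruence
--     # (total + value) % 10 == 0.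
--     ok = control_char.isdigit() and letter not in "KPQS" \
--         and (total + int(control_char)) % 10 == 0
--     if not ok and letter not in "ABEH":
--         pos = "JABCDEFGHI".find(control_char)
--         ok = pos >= 0 and (total + pos) % 10 == 0
--     return ok
-- ===== Notes on version B (the rewrite author's own statement) =====
-- stated objective: alternative
-- what changed: A builds the expected control digit/letter from two index-tuple passes (a generator sum over indices (1,3,5) plus a divmod doubled-digit loop over (0,2,4,6)) and compares strings; B walks the block right-to-left once with a doubling toggle and an arithmetic 2v-9 fold, then instead of constructing the expected control character it reads a candidate value off the actual control character (int() for digits, str.find in the control-letter alphabet for letters) and checks the Luhn congruence (total + value) % 10 == 0.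
import Mathlib
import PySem

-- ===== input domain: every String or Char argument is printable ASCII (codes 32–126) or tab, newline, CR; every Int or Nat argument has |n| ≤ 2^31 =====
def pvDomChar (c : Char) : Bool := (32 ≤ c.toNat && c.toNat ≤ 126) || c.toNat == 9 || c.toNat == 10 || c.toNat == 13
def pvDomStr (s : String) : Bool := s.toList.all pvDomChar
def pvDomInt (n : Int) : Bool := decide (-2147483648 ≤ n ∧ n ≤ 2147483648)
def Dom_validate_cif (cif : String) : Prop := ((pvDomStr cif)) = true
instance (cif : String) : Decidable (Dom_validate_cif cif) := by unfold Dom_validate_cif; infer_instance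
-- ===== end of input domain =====

-- B replaces A's two index-tuple passes and its expected-control-character construction by a
-- right-to-left toggle fold and an inverse Luhn-congruence check on the actual control
-- character; objective: alternative (same cost, different algorithm shape).

-- int(d) for a single-character string d; exact when PySem.Chars.isdigit d (ASCII '0'..'9') holds,
-- which both ports guarantee before calling it.
def pyDigit (c : Char) : Int := (c.toNat : Int) - 48

-- ===== PORT A =====
-- even_sum = sum(int(number_block[i]) for i in (1, 3, 5))
def evenSum (nb : List Char) : Int :=
  (([1, 3, 5] : List Int).map (fun i => pyDigit (PySem.List.pyGetD nb i ' '))).sum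

-- odd_sum loop over (0, 2, 4, 6) with v = int(nb[i])*2; odd_sum += v//10 + v%10
def oddSum (nb : List Char) : Int :=
  ([0, 2, 4, 6] : List Int).foldl (fun acc i =>
    acc + (PySem.Int.floordiv (pyDigit (PySem.List.pyGetD nb i ' ') * 2) 10
           + PySem.Int.mod (pyDigit (PySem.List.pyGetD nb i ' ') * 2) 10)) 0

-- A's tail: build control_digit / control_letter from the total and compare (A's code verbatim)
def acceptA (letter cc : Char) (total : Int) : Bool :=
  let base_digit := PySem.Int.mod (10 - PySem.Int.mod total 10) 10
  let control_digit := (PySem.Int.toStr base_digit).toList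
  let control_letter := PySem.List.pyGetD "JABCDEFGHI".toList base_digit ' '  -- base_digit ∈ [0,10)
  if PySem.Chars.isIn [letter] "ABEH".toList then [cc] == control_digit
  else if PySem.Chars.isIn [letter] "KPQS".toList then cc == control_letter
  else [cc] == control_digit || cc == control_letter

def validate_cif (cif : String) : Bool :=
  let s := PySem.Chars.upper (PySem.Chars.strip cif.toList)
  if PySem.List.len s ≠ 9 then false
  else
    let letter := PySem.List.pyGetD s 0 ' '        -- cif[0], in range since len = 9
    let number_block := PySem.List.slice s (some 1) (some 8)
    let control_char := PySem.List.pyGetD s 8 ' '  -- cif[8], in range since len = 9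
    if !PySem.Chars.strIsalpha [letter] || !PySem.Chars.strIsdigit number_block
        || !PySem.Chars.strIsalnum [control_char] then false
    else
      acceptA letter control_char (evenSum number_block + oddSum number_block)

-- ===== PORT B =====
-- for d in reversed(number_block): v = int(d); if double: v = 2*v-9 if v > 4 else 2*v; total += v; double = not double
def luhnRevTotal (nb : List Char) : Int :=
  (nb.reverse.foldl (fun (st : Int × Bool) d =>
    let v := pyDigit d
    let v := if st.2 then (if v > 4 then 2 * v - 9 else 2 * v) else v
    (st.1 + v, !st.2)) (0, true)).1

-- B's tail: read a candidate value off the control character and check (total + v) % 10 == 0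
def acceptB (letter cc : Char) (total : Int) : Bool :=
  let ok := PySem.Chars.isdigit cc && !(PySem.Chars.isIn [letter] "KPQS".toList)
            && (PySem.Int.mod (total + pyDigit cc) 10 == 0)
  if !ok && !(PySem.Chars.isIn [letter] "ABEH".toList) then
    let pos := PySem.Chars.find "JABCDEFGHI".toList [cc]
    decide (0 ≤ pos) && (PySem.Int.mod (total + pos) 10 == 0)
  else ok

def validate_cif_alt (cif : String) : Bool :=
  let s := PySem.Chars.upper (PySem.Chars.strip cif.toList)
  if PySem.List.len s ≠ 9 then false
  else
    let letter := PySem.List.pyGetD s 0 ' '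
    let number_block := PySem.List.slice s (some 1) (some 8)
    let control_char := PySem.List.pyGetD s 8 ' '
    if !PySem.Chars.strIsalpha [letter] || !PySem.Chars.strIsdigit number_block
        || !PySem.Chars.strIsalnum [control_char] then false
    else
      acceptB letter control_char (luhnRevTotal number_block)

-- ===== PRECONDITION & SPEC =====
def Spec_validate_cif (cif : String) (out : Bool) : Prop := out = validate_cif_alt cif
instance (cif : String) (out : Bool) : Decidable (Spec_validate_cif cif out) := by unfold Spec_validate_cif; infer_instance

-- ===== CLAIM (what is proved, stated in full; the proofs are below) =====
def Claim_equal_validate_cif : Prop := ∀ (cif : String), Dom_validate_cif cif → Spec_validate_cif cif (validate_cif cif)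

-- ===== LEMMAS AND PROOFS =====

theorem char_of_toNat {c d : Char} (h : c.toNat = d.toNat) : c = d :=
  Char.ext (UInt32.toNat_inj.mp h)

theorem digit_bounds (c : Char) (h : PySem.Chars.isdigit c = true) :
    0 ≤ pyDigit c ∧ pyDigit c ≤ 9 := by
  simp [PySem.Chars.isdigit, Char.le_def, UInt32.le_iff_toNat_le] at h
  unfold pyDigit
  constructor <;> omega

-- on a 7-digit block B's reversed toggle fold equals A's two sums
theorem totals_eq (c1 c2 c3 c4 c5 c6 c7 : Char)
    (h : PySem.Chars.strIsdigit [c1, c2, c3, c4, c5, c6, c7] = true) :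
    luhnRevTotal [c1, c2, c3, c4, c5, c6, c7]
      = evenSum [c1, c2, c3, c4, c5, c6, c7] + oddSum [c1, c2, c3, c4, c5, c6, c7] := by
  simp [PySem.Chars.strIsdigit] at h
  obtain ⟨h1, h2, h3, h4, h5, h6, h7⟩ := h
  obtain ⟨a1, b1⟩ := digit_bounds _ h1
  obtain ⟨a3, b3⟩ := digit_bounds _ h3
  obtain ⟨a5, b5⟩ := digit_bounds _ h5
  obtain ⟨a7, b7⟩ := digit_bounds _ h7
  simp only [luhnRevTotal, evenSum, oddSum, List.reverse, List.foldl, List.map, List.sum,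
    List.reverseAux]
  norm_num
  simp [PySem.List.pyGetD, PySem.List.pyGet?, PySem.List.pyIdx?]
  split_ifs <;> omega

-- the congruence (total + v) % 10 == 0 picks out exactly the base digit
theorem mod_cong (T v : Int) (h0 : 0 ≤ v) (h9 : v < 10) :
    (PySem.Int.mod (T + v) 10 == 0)
      = (v == PySem.Int.mod (10 - PySem.Int.mod T 10) 10) := by
  rw [Bool.eq_iff_iff]
  simp only [PySem.Int.mod_eq_emod_of_pos (by norm_num : (0:Int) < 10), beq_iff_eq]
  omega

-- comparing [cc] with the singleton str(b) is the digit test plus value equality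
theorem eq_toChars_case (cc e : Char) (b : Int) (he : (PySem.Int.toStr b).toList = [e])
    (hd : PySem.Chars.isdigit e = true) (hv : pyDigit e = b) :
    (([cc] : List Char) == (PySem.Int.toStr b).toList)
      = (PySem.Chars.isdigit cc && (pyDigit cc == b)) := by
  rw [he, Bool.eq_iff_iff]
  simp only [beq_iff_eq, List.cons.injEq, and_true, Bool.and_eq_true]
  constructor
  · rintro rfl; exact ⟨hd, by simp [hv]⟩
  · rintro ⟨h1, h2⟩
    have : cc.toNat = e.toNat := by
      simp only [pyDigit] at h2 hv; omega
    exact char_of_toNat this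

theorem eq_toChars (cc : Char) (b : Int) (h0 : 0 ≤ b) (h9 : b < 10) :
    (([cc] : List Char) == (PySem.Int.toStr b).toList)
      = (PySem.Chars.isdigit cc && (pyDigit cc == b)) := by
  interval_cases b
  · exact eq_toChars_case cc '0' 0 (by decide) (by decide) (by decide)
  · exact eq_toChars_case cc '1' 1 (by decide) (by decide) (by decide)
  · exact eq_toChars_case cc '2' 2 (by decide) (by decide) (by decide)
  · exact eq_toChars_case cc '3' 3 (by decide) (by decide) (by decide)
  · exact eq_toChars_case cc '4' 4 (by decide) (by decide) (by decide)
  · exact eq_toChars_case cc '5' 5 (by decide) (by decide) (by decide)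
  · exact eq_toChars_case cc '6' 6 (by decide) (by decide) (by decide)
  · exact eq_toChars_case cc '7' 7 (by decide) (by decide) (by decide)
  · exact eq_toChars_case cc '8' 8 (by decide) (by decide) (by decide)
  · exact eq_toChars_case cc '9' 9 (by decide) (by decide) (by decide)

-- "JABCDEFGHI".find(cc) as an if-chain over the ten letters
theorem find_single (cc : Char) :
    PySem.Chars.find "JABCDEFGHI".toList [cc]
      = if cc = 'J' then 0 else if cc = 'A' then 1 else if cc = 'B' then 2
        else if cc = 'C' then 3 else if cc = 'D' then 4 else if cc = 'E' then 5
        else if cc = 'F' then 6 else if cc = 'G' then 7 else if cc = 'H' then 8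
        else if cc = 'I' then 9 else -1 := by
  split_ifs with hJ hA hB hC hD hE hF hG hH hI
  · subst hJ; decide
  · subst hA; decide
  · subst hB; decide
  · subst hC; decide
  · subst hD; decide
  · subst hE; decide
  · subst hF; decide
  · subst hG; decide
  · subst hH; decide
  · subst hI; decide
  · rw [PySem.Chars.find_eq_neg_one_iff, List.singleton_infix_iff]
    rw [show "JABCDEFGHI".toList = ['J','A','B','C','D','E','F','G','H','I'] from rfl]
    intro h
    fin_cases h <;> simp_all

-- B's positional check equals A's control-letter comparison, for b ∈ [0,10)
theorem eq_letter (cc : Char) (b : Int) (h0 : 0 ≤ b) (h9 : b < 10) :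
    (decide (0 ≤ PySem.Chars.find "JABCDEFGHI".toList [cc])
      && (PySem.Chars.find "JABCDEFGHI".toList [cc] == b))
      = (cc == PySem.List.pyGetD "JABCDEFGHI".toList b ' ') := by
  rw [find_single]
  split_ifs with h1 h2 h3 h4 h5 h6 h7 h8 h9' h10
  · subst h1; interval_cases b <;> decide
  · subst h2; interval_cases b <;> decide
  · subst h3; interval_cases b <;> decide
  · subst h4; interval_cases b <;> decide
  · subst h5; interval_cases b <;> decide
  · subst h6; interval_cases b <;> decide
  · subst h7; interval_cases b <;> decide
  · subst h8; interval_cases b <;> decide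
  · subst h9'; interval_cases b <;> decide
  · subst h10; interval_cases b <;> decide
  · interval_cases b <;> simp_all [PySem.List.pyGetD, PySem.List.pyGet?, PySem.List.pyIdx?]

-- the occurrence index of a single character in "JABCDEFGHI" is below 10
theorem find_lt (cc : Char) : PySem.Chars.find "JABCDEFGHI".toList [cc] < 10 := by
  rw [find_single]; split_ifs <;> norm_num

-- "ABEH" and "KPQS" are disjoint
theorem abeh_not_kpqs (letter : Char) (h : PySem.Chars.isIn [letter] "ABEH".toList = true) :
    PySem.Chars.isIn [letter] "KPQS".toList = false := by
  rw [PySem.Chars.isIn_iff_infix, List.singleton_infix_iff] at h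
  rw [PySem.Chars.isIn_eq_false_iff, List.singleton_infix_iff]
  rw [show "ABEH".toList = ['A','B','E','H'] from rfl] at h
  fin_cases h <;> decide

-- the two acceptance tails agree for every letter, control char and total
theorem accept_eq (letter cc : Char) (T : Int) : acceptA letter cc T = acceptB letter cc T := by
  have h10 : (0:Int) < 10 := by norm_num
  have hb0 := PySem.Int.mod_nonneg (10 - PySem.Int.mod T 10) h10
  have hb9 := PySem.Int.mod_lt (10 - PySem.Int.mod T 10) h10
  unfold acceptA acceptB
  have hok : (PySem.Chars.isdigit cc && !(PySem.Chars.isIn [letter] "KPQS".toList)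
        && (PySem.Int.mod (T + pyDigit cc) 10 == 0))
      = (!(PySem.Chars.isIn [letter] "KPQS".toList)
        && (([cc] : List Char) == (PySem.Int.toStr (PySem.Int.mod (10 - PySem.Int.mod T 10) 10)).toList)) := by
    rw [eq_toChars cc _ hb0 hb9]
    by_cases hd : PySem.Chars.isdigit cc = true
    · obtain ⟨d0, d9⟩ := digit_bounds _ hd
      rw [mod_cong T _ d0 (by omega), hd]
      cases PySem.Chars.isIn [letter] "KPQS".toList <;>
        cases pyDigit cc == PySem.Int.mod (10 - PySem.Int.mod T 10) 10 <;> rfl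
    · simp only [Bool.not_eq_true] at hd
      rw [hd]
      cases PySem.Chars.isIn [letter] "KPQS".toList <;> rfl
  have hpos : (decide (0 ≤ PySem.Chars.find "JABCDEFGHI".toList [cc])
        && (PySem.Int.mod (T + PySem.Chars.find "JABCDEFGHI".toList [cc]) 10 == 0))
      = (cc == PySem.List.pyGetD "JABCDEFGHI".toList (PySem.Int.mod (10 - PySem.Int.mod T 10) 10) ' ') := by
    by_cases hf : 0 ≤ PySem.Chars.find "JABCDEFGHI".toList [cc]
    · rw [mod_cong T _ hf (find_lt cc)]
      exact eq_letter cc _ hb0 hb9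
    · rw [← eq_letter cc _ hb0 hb9, decide_eq_false hf]
      rfl
  simp only [hok, hpos]
  by_cases hA : PySem.Chars.isIn [letter] "ABEH".toList = true
  · rw [hA, abeh_not_kpqs letter hA]
    cases ([cc] : List Char) == (PySem.Int.toStr (PySem.Int.mod (10 - PySem.Int.mod T 10) 10)).toList <;> rfl
  · simp only [Bool.not_eq_true] at hA
    rw [hA]
    by_cases hK : PySem.Chars.isIn [letter] "KPQS".toList = true
    · rw [hK]
      cases cc == PySem.List.pyGetD "JABCDEFGHI".toList (PySem.Int.mod (10 - PySem.Int.mod T 10) 10) ' ' <;> rfl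
    · simp only [Bool.not_eq_true] at hK
      rw [hK]
      cases h : (([cc] : List Char) == (PySem.Int.toStr (PySem.Int.mod (10 - PySem.Int.mod T 10) 10)).toList) <;>
        cases cc == PySem.List.pyGetD "JABCDEFGHI".toList (PySem.Int.mod (10 - PySem.Int.mod T 10) 10) ' ' <;> rfl

-- the length test of the ports, as an Int disequality
theorem lenNe (xs : List Char) (h : xs.length ≠ 9) : PySem.List.len xs ≠ 9 := by
  simp [PySem.List.len]
  omega

-- ===== VERDICT (by name: the statement is the Claim_ definition above) =====
set_option maxHeartbeats 1000000 in
theorem validate_cif_spec : Claim_equal_validate_cif := by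
  intro cif _
  unfold Spec_validate_cif validate_cif validate_cif_alt
  generalize PySem.Chars.upper (PySem.Chars.strip cif.toList) = s
  match s with
  | [c0, c1, c2, c3, c4, c5, c6, c7, c8] =>
    have hlen : ¬ (PySem.List.len [c0, c1, c2, c3, c4, c5, c6, c7, c8] ≠ 9) := by
      norm_num [PySem.List.len]
    have h7 : ((8 : Int).toNat - 1) = 7 := by decide
    have hsl : PySem.List.slice [c0, c1, c2, c3, c4, c5, c6, c7, c8] (some 1) (some 8)
        = [c1, c2, c3, c4, c5, c6, c7] := by
      norm_num [PySem.List.slice, PySem.List.clampIdx, h7]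
    simp only [if_neg hlen, hsl]
    by_cases hg : PySem.Chars.strIsdigit [c1, c2, c3, c4, c5, c6, c7] = true
    · rw [totals_eq c1 c2 c3 c4 c5 c6 c7 hg,
        accept_eq (PySem.List.pyGetD [c0, c1, c2, c3, c4, c5, c6, c7, c8] 0 ' ')
          (PySem.List.pyGetD [c0, c1, c2, c3, c4, c5, c6, c7, c8] 8 ' ')
          (evenSum [c1, c2, c3, c4, c5, c6, c7] + oddSum [c1, c2, c3, c4, c5, c6, c7])]
    · simp only [Bool.not_eq_true] at hg
      simp [hg]
  | [] => simp only [if_pos (lenNe [] (by simp))]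
  | [a] => simp only [if_pos (lenNe [a] (by simp))]
  | [a, b] => simp only [if_pos (lenNe [a, b] (by simp))]
  | [a, b, c] => simp only [if_pos (lenNe [a, b, c] (by simp))]
  | [a, b, c, d] => simp only [if_pos (lenNe [a, b, c, d] (by simp))]
  | [a, b, c, d, e] => simp only [if_pos (lenNe [a, b, c, d, e] (by simp))]
  | [a, b, c, d, e, f] => simp only [if_pos (lenNe [a, b, c, d, e, f] (by simp))]
  | [a, b, c, d, e, f, g] => simp only [if_pos (lenNe [a, b, c, d, e, f, g] (by simp))]
  | [a, b, c, d, e, f, g, h] => simp only [if_pos (lenNe [a, b, c, d, e, f, g, h] (by simp))]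
  | c0 :: c1 :: c2 :: c3 :: c4 :: c5 :: c6 :: c7 :: c8 :: c9 :: rest =>
    simp only [if_pos (lenNe (c0 :: c1 :: c2 :: c3 :: c4 :: c5 :: c6 :: c7 :: c8 :: c9 :: rest)
      (by simp))]
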